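-- pv_equiv track=rewrite | github.com/jenhsia/goodhart_nlp_explainability | eval_x/create_eval_x_approx_data.py | combine_indices
-- ===== SOURCE A (Python) =====
-- def combine_indices(indices):
--     hard_rationale_predictions = []
--     if(len(indices) == 0):
--         hard_rationale_predictions.append({"end_token": (int)(0), "start_token": (int)(0)})
--         return hard_rationale_predictions
--     start_index = indices[0]
--     prev_index = start_index
--     if(len(indices)==1):
--         hard_rationale_predictions.append({"end_token": (int)(start_index+1), "start_token": (int)(start_index)})
--         return hard_rationale_predictions
--     for next_index in indices[1:]:
--         # if not contiguous
--         if (next_index != (prev_index +1)):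
--             end_index = prev_index +1
--             hard_rationale_predictions.append({"end_token": (int)(end_index), "start_token": (int)(start_index)})
--             start_index = next_index
--         prev_index = next_index
--     if (prev_index == indices[-1]):
--         hard_rationale_predictions.append({"end_token": (int)(prev_index +1), "start_token": (int)(start_index)})
--     return hard_rationale_predictions
-- ===== SOURCE B (Python) =====
-- from itertools import groupby
--
--
-- def combine_indices(indices):
--     if len(indices) == 0:
--         return [{"end_token": 0, "start_token": 0}]
--     out = []
--     # group maximal runs of consecutive integers: value minus position is constant on a run
--     for _, grp in groupby(enumerate(indices), key=lambda p: p[1] - p[0]):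
--         grp = list(grp)
--         start = grp[0][1]
--         end = grp[-1][1]
--         out.append({"end_token": int(end + 1), "start_token": int(start)})
--     return out
-- ===== Notes on version B (the rewrite author's own statement) =====
-- stated objective: idiomatic
-- what changed: Replaces the explicit start/prev state machine (with its trailing flush check) by a single itertools.groupby pass over enumerate(indices) keyed on value minus position, so each maximal consecutive run becomes one group mapped directly to a range entry.
import Mathlib
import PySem

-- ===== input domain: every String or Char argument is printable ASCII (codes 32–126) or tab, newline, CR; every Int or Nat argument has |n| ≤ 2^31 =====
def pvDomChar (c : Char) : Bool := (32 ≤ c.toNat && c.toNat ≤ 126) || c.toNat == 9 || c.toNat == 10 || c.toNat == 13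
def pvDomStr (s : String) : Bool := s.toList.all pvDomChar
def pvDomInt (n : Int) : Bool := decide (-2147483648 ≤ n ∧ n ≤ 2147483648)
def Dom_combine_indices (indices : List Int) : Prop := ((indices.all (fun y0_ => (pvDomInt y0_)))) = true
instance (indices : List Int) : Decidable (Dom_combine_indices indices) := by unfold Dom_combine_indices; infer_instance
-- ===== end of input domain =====

-- B merges consecutive-index runs with one groupby(value - position) pass instead of A's
-- start/prev state machine; objective: idiomatic, same cost, return value proved equal.

-- ===== PORT A =====
-- A-side helper: the body of A's for-loop over state (start_index, prev_index, predictions)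
def pvF : Int × Int × List (List (String × Int)) → Int → Int × Int × List (List (String × Int)) :=
  fun st next =>
    if next ≠ st.2.1 + 1 then
      (next, next, st.2.2 ++ [[("end_token", st.2.1 + 1), ("start_token", st.1)]])
    else (st.1, next, st.2.2)

def combine_indices (indices : List Int) : List (List (String × Int)) :=
  match indices with
  | [] => [[("end_token", (0 : Int)), ("start_token", (0 : Int))]]
  | i0 :: rest =>
    if rest = [] then [[("end_token", i0 + 1), ("start_token", i0)]]
    else
      -- loop state: (start_index, prev_index, hard_rationale_predictions)
      let st := rest.foldl pvF (i0, i0, [])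
      -- indices[-1] on the (nonempty) list
      if st.2.1 = (i0 :: rest).getLastD 0 then
        st.2.2 ++ [[("end_token", st.2.1 + 1), ("start_token", st.1)]]
      else st.2.2

-- ===== PORT B =====
-- enumerate(indices) starting at n
def pvEnumFrom (n : Int) : List Int → List (Int × Int)
  | [] => []
  | x :: xs => (n, x) :: pvEnumFrom (n + 1) xs

-- groupby key: value minus position
def pvKey (p : Int × Int) : Int := p.2 - p.1

-- itertools.groupby on a nonempty list (head x, tail xs): first group and remaining groups
def pvGroupByRun (x : Int × Int) : List (Int × Int) → List (Int × Int) × List (List (Int × Int))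
  | [] => ([x], [])
  | y :: ys =>
    let r := pvGroupByRun y ys
    if pvKey x = pvKey y then (x :: r.1, r.2) else ([x], r.1 :: r.2)

-- one group → {"end_token": end + 1, "start_token": start}
def pvEntry (g : List (Int × Int)) : List (String × Int) :=
  [("end_token", (g.getLastD (0, 0)).2 + 1), ("start_token", (g.headD (0, 0)).2)]

def combine_indices_alt (indices : List Int) : List (List (String × Int)) :=
  match pvEnumFrom 0 indices with
  | [] => [[("end_token", (0 : Int)), ("start_token", (0 : Int))]]
  | x :: xs =>
    let r := pvGroupByRun x xs
    (r.1 :: r.2).map pvEntry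

-- ===== PRECONDITION & SPEC =====
def Spec_combine_indices (indices : List Int) (out : List (List (String × Int))) : Prop := out = combine_indices_alt indices
instance (indices : List Int) (out : List (List (String × Int))) : Decidable (Spec_combine_indices indices out) := by unfold Spec_combine_indices; infer_instance

-- ===== CLAIM (what is proved, stated in full; the proofs are below) =====
def Claim_equal_combine_indices : Prop := ∀ (indices : List Int), Dom_combine_indices indices → Spec_combine_indices indices (combine_indices indices)

-- ===== LEMMAS AND PROOFS =====

-- canonical run-splitting both sides are reduced to
def pvRuns (s p : Int) : List Int → List (List (String × Int))
  | [] => [[("end_token", p + 1), ("start_token", s)]]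
  | x :: xs =>
    if x = p + 1 then pvRuns s x xs
    else [("end_token", p + 1), ("start_token", s)] :: pvRuns x x xs

theorem pvFold_prev (xs : List Int) : ∀ (s p : Int) (acc : List (List (String × Int))),
    (xs.foldl pvF (s, p, acc)).2.1 = xs.getLastD p := by
  induction xs with
  | nil => intro s p acc; simp
  | cons x xs ih =>
    intro s p acc
    simp only [List.foldl_cons, List.getLastD_cons, pvF]
    split_ifs <;> exact ih _ _ _

theorem pvFold_runs (xs : List Int) : ∀ (s p : Int) (acc : List (List (String × Int))),
    (xs.foldl pvF (s, p, acc)).2.2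
      ++ [[("end_token", (xs.foldl pvF (s, p, acc)).2.1 + 1),
           ("start_token", (xs.foldl pvF (s, p, acc)).1)]]
      = acc ++ pvRuns s p xs := by
  induction xs with
  | nil => intro s p acc; simp [pvRuns]
  | cons x xs ih =>
    intro s p acc
    simp only [List.foldl_cons, pvF, pvRuns]
    by_cases h : x = p + 1
    · rw [if_neg (by simp [h]), if_pos h]
      exact ih s x acc
    · simp only [if_pos h, if_neg h]
      rw [ih x x (acc ++ [[("end_token", p + 1), ("start_token", s)]])]
      simp

theorem pvGroup_shape (xs : List (Int × Int)) (x : Int × Int) :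
    ∃ t, (pvGroupByRun x xs).1 = x :: t := by
  cases xs with
  | nil => exact ⟨[], rfl⟩
  | cons y ys =>
    simp only [pvGroupByRun]
    split_ifs <;> exact ⟨_, rfl⟩

theorem pvGroup_main (xs : List Int) : ∀ (n v s : Int),
    [("end_token", (((pvGroupByRun (n, v) (pvEnumFrom (n + 1) xs)).1).getLastD (0, 0)).2 + 1),
     ("start_token", s)]
      :: ((pvGroupByRun (n, v) (pvEnumFrom (n + 1) xs)).2).map pvEntry
      = pvRuns s v xs := by
  induction xs with
  | nil => intro n v s; simp [pvEnumFrom, pvGroupByRun, pvRuns]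
  | cons y ys ih =>
    intro n v s
    simp only [pvEnumFrom, pvGroupByRun, pvRuns]
    by_cases h : y = v + 1
    · have hk : pvKey (n, v) = pvKey (n + 1, y) := by simp [pvKey]; omega
      simp only [if_pos hk, if_pos h]
      obtain ⟨t, ht⟩ := pvGroup_shape (pvEnumFrom (n + 1 + 1) ys) (n + 1, y)
      have := ih (n + 1) y s
      rw [ht] at this ⊢
      simpa using this
    · have hk : ¬ pvKey (n, v) = pvKey (n + 1, y) := by simp [pvKey]; omega
      simp only [if_neg hk, if_neg h, List.map_cons]
      obtain ⟨t, ht⟩ := pvGroup_shape (pvEnumFrom (n + 1 + 1) ys) (n + 1, y)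
      have := ih (n + 1) y y
      rw [ht] at this ⊢
      simp only [List.getLastD, List.cons.injEq]
      refine ⟨by simp, ?_⟩
      simpa [pvEntry] using this

theorem pvAlt_runs (i0 : Int) (rest : List Int) :
    combine_indices_alt (i0 :: rest) = pvRuns i0 i0 rest := by
  simp only [combine_indices_alt, pvEnumFrom]
  obtain ⟨t, ht⟩ := pvGroup_shape (pvEnumFrom (0 + 1) rest) (0, i0)
  have := pvGroup_main rest 0 i0 i0
  rw [ht] at this ⊢
  simpa [pvEntry] using this

-- ===== VERDICT (by name: the statement is the Claim_ definition above) =====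
theorem combine_indices_spec : Claim_equal_combine_indices := by
  intro indices _
  unfold Spec_combine_indices
  cases indices with
  | nil => rfl
  | cons i0 rest =>
    rw [pvAlt_runs]
    cases rest with
    | nil => simp [combine_indices, pvRuns]
    | cons r rs =>
      show combine_indices (i0 :: r :: rs) = pvRuns i0 i0 (r :: rs)
      simp only [combine_indices]
      rw [if_neg (by simp)]
      have hp := pvFold_prev (r :: rs) i0 i0 []
      have hc : ((r :: rs).foldl pvF (i0, i0, [])).2.1 = (i0 :: r :: rs).getLastD 0 := by
        rw [hp]; exact (List.getLastD_cons).symm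
      show (if ((r :: rs).foldl pvF (i0, i0, [])).2.1 = (i0 :: r :: rs).getLastD 0 then _ else _) = _
      rw [if_pos hc]
      simpa using pvFold_runs (r :: rs) i0 i0 []
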